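-- pv_equiv track=rewrite | github.com/r4sky0/sphinx-lumina-theme | src/sphinx_lumina_theme/_seo.py | _handle_from_twitter_url
-- ===== SOURCE A (Python) =====
-- def _handle_from_twitter_url(url: str) -> str | None:
--     """Extract @handle from a Twitter/X profile URL like https://twitter.com/foo."""
--     if not url:
--         return None
--     for prefix in (
--         "https://twitter.com/",
--         "https://www.twitter.com/",
--         "https://x.com/",
--         "https://www.x.com/",
--     ):
--         if url.startswith(prefix):
--             tail = url[len(prefix) :].strip("/").split("/", 1)[0]
--             if tail:
--                 return f"@{tail}"
--     return None
-- ===== SOURCE B (Python) =====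
-- def _handle_from_twitter_url(url: str) -> str | None:
--     """Extract @handle from a Twitter/X profile URL like https://twitter.com/foo."""
--     if not url.startswith("https://"):
--         return None
--     rest = url[8:]
--     if rest.startswith("www."):
--         rest = rest[4:]
--     if rest.startswith("twitter.com/"):
--         path = rest[12:]
--     elif rest.startswith("x.com/"):
--         path = rest[6:]
--     else:
--         return None
--     handle = path.lstrip("/").partition("/")[0]
--     return f"@{handle}" if handle else None
-- ===== Notes on version B (the rewrite author's own statement) =====
-- stated objective: simpler
-- what changed: B replaces A's loop over four composite URL prefixes (each followed by a strip-and-split of the tail) with a single factored parse: scheme check, optional www-prefix strip, host dispatch, then a left-strip of slashes and a partition at the first slash.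
import Mathlib
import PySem

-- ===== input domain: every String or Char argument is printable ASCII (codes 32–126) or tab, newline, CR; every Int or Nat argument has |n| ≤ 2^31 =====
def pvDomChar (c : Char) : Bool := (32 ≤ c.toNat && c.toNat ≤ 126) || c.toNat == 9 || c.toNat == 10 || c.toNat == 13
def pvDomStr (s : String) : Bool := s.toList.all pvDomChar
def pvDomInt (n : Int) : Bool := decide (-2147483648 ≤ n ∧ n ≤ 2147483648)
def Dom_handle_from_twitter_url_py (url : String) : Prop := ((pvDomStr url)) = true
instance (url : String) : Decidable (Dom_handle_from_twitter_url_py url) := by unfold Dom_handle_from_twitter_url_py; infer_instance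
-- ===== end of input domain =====

-- B factors the four accepted prefixes into scheme / optional "www." / host checks and takes the
-- handle with lstrip+partition instead of A's strip+split over a prefix loop (objective: simpler).

-- ===== PORT A =====
-- tail = url[len(prefix):].strip("/").split("/", 1)[0]
-- split(sep, 1) with sep = "/" ≠ "" always returns `some` and a nonempty list, so the
-- Option.getD and the [0] indexing (PySem.List.pyGetD) are exact here.
def pvTailA (url : String) (p : String) : String :=
  PySem.List.pyGetD
    ((PySem.Str.splitMax? (PySem.Str.stripChars (PySem.Str.slice url (some (PySem.Str.len p)) none) "/") "/" 1).getD [])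
    0 ""

-- the `for prefix in (...)` loop: first matching prefix with a nonempty tail wins, else fall through
def pvLoopA (url : String) : List String → Option String
  | [] => none
  | p :: ps =>
    if PySem.Str.startswith url p then
      if pvTailA url p ≠ "" then some ("@" ++ pvTailA url p) else pvLoopA url ps
    else pvLoopA url ps

def handle_from_twitter_url_py (url : String) : Option String :=
  if url = "" then none
  else pvLoopA url
    ["https://twitter.com/", "https://www.twitter.com/", "https://x.com/", "https://www.x.com/"]

-- ===== PORT B =====
-- handle = path.lstrip("/").partition("/")[0], ported by hand (exact: lstrip("/") drops the
-- leading run of '/', and partition("/")[0] is the chars before the first '/').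
def pvHandleB (path : List Char) : List Char :=
  (path.dropWhile (· == '/')).takeWhile (· != '/')

-- url[8:], rest[4:], … on nonnegative literal indices are List.drop (exact).
-- rest = url[8:], optionally stripped of a leading "www."
def pvRestB (u : List Char) : List Char :=
  if PySem.Chars.startswith (u.drop 8) "www.".toList then (u.drop 8).drop 4 else u.drop 8

-- the if/elif/else host dispatch: some path on a host match, none otherwise
def pvPathB (rest : List Char) : Option (List Char) :=
  if PySem.Chars.startswith rest "twitter.com/".toList then some (rest.drop 12)
  else if PySem.Chars.startswith rest "x.com/".toList then some (rest.drop 6)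
  else none

def handle_from_twitter_url_py_alt (url : String) : Option String :=
  if ¬ PySem.Str.startswith url "https://" then none
  else
    match pvPathB (pvRestB url.toList) with
    | none => none
    | some path =>
      if pvHandleB path ≠ [] then some ("@" ++ String.ofList (pvHandleB path)) else none

-- ===== PRECONDITION & SPEC =====
def Spec_handle_from_twitter_url_py (url : String) (out : Option String) : Prop := out = handle_from_twitter_url_py_alt url
instance (url : String) (out : Option String) : Decidable (Spec_handle_from_twitter_url_py url out) := by unfold Spec_handle_from_twitter_url_py; infer_instance

-- ===== CLAIM (what is proved, stated in full; the proofs are below) =====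
def Claim_equal_handle_from_twitter_url_py : Prop := ∀ (url : String), Dom_handle_from_twitter_url_py url → Spec_handle_from_twitter_url_py url (handle_from_twitter_url_py url)

-- ===== LEMMAS AND PROOFS =====

-- `go` with maxsplit budget 0 returns immediately
theorem pv_go_zero (f : Nat) (l cur : List Char) (acc : List (List Char)) :
    PySem.Chars.splitOnMax.go ['/'] f 0 l cur acc = ((cur.reverse ++ l) :: acc).reverse := by
  cases f <;> cases l <;> simp [PySem.Chars.splitOnMax.go]

-- head of `s.split("/", 1)` is everything before the first '/'
theorem pv_go_one_head (f : Nat) (l cur : List Char) (h : l.length < f) :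
    (PySem.Chars.splitOnMax.go ['/'] f 1 l cur []).headD [] = cur.reverse ++ l.takeWhile (· != '/') := by
  induction f generalizing l cur with
  | zero => omega
  | succ n ih =>
    cases l with
    | nil => simp [PySem.Chars.splitOnMax.go]
    | cons c rest =>
      by_cases hc : c = '/'
      · subst hc
        simp [PySem.Chars.splitOnMax.go, pv_go_zero]
      · have hp : (['/'].isPrefixOf (c :: rest)) = false := by
          simp only [List.isPrefixOf, Bool.and_true]
          exact decide_eq_false (fun h => hc h.symm)
        simp only [PySem.Chars.splitOnMax.go, hp, if_neg (by omega : ¬ (1:Nat) = 0),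
          if_neg (by simp : ¬ (false = true))]
        rw [ih rest (c :: cur) (by simpa using Nat.lt_of_succ_lt_succ h)]
        simp [bne, hc]

-- head of split of the stripped tail = pvHandleB
theorem pv_head_split (t : List Char) :
    PySem.List.pyGetD (PySem.Chars.splitOnMax (PySem.Chars.stripChars t ['/']) ['/'] 1) 0 [] = pvHandleB t := by
  have hgetD : ∀ (xs : List (List Char)), PySem.List.pyGetD xs 0 [] = xs.headD [] := by
    intro xs; rw [PySem.List.pyGetD_zero]; cases xs <;> rfl
  rw [hgetD, PySem.Chars.splitOnMax, if_neg (by omega : ¬ (1:Int) < 0)]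
  simp only [Int.toNat_one]
  rw [pv_go_one_head _ _ _ (by omega)]
  have hcont : (fun c => (['/'] : List Char).contains c) = (fun c => c == '/') := by
    funext c; by_cases h : c = '/' <;> simp [h]
  rw [PySem.Chars.stripChars]
  simp only [hcont]
  -- stripChars t ['/'] = (t.dropWhile (· == '/')).rdropWhile (· == '/')
  have hstrip : (List.dropWhile (fun c => c == '/')
      (List.dropWhile (fun c => c == '/') t).reverse).reverse
      = (t.dropWhile (fun c => c == '/')).rdropWhile (fun c => c == '/') := by
    rw [List.rdropWhile]
  rw [List.reverse_nil, List.nil_append, hstrip]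
  -- takeWhile (· != '/') ignores the trailing run of '/' that rdropWhile removed
  set d := t.dropWhile (fun c => c == '/') with hd
  have hsplit : (d.rdropWhile (fun c => c == '/')) ++ (d.rtakeWhile (fun c => c == '/')) = d :=
    List.rdropWhile_append_rtakeWhile
  have : List.takeWhile (fun x => x != '/') d
      = List.takeWhile (fun x => x != '/') (d.rdropWhile (fun c => c == '/')) := by
    conv_lhs => rw [← hsplit]
    rw [List.takeWhile_append]
    split_ifs with hlen
    · have hall : List.takeWhile (fun x => x != '/')
          (d.rtakeWhile (fun c => c == '/')) = [] := by
        cases hr : d.rtakeWhile (fun c => c == '/') with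
        | nil => rfl
        | cons x xs =>
          have hx : (fun c => c == '/') x = true :=
            List.mem_rtakeWhile_imp (p := fun c => c == '/') (l := d) (x := x)
              (by rw [hr]; exact List.mem_cons_self)
          simp only [beq_iff_eq] at hx
          simp [hx]
      rw [hall, List.append_nil]
      exact ((List.takeWhile_prefix _).eq_of_length hlen).symm
    · rfl
  rw [← this]
  rfl

-- (xs ++ ys) is a prefix of l iff xs is and ys is a prefix of the rest
theorem pv_prefix_append_iff (xs ys l : List Char) :
    (xs ++ ys) <+: l ↔ xs <+: l ∧ ys <+: l.drop xs.length := by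
  constructor
  · rintro ⟨t, ht⟩
    subst ht
    constructor
    · exact ⟨ys ++ t, by simp⟩
    · exact ⟨t, by simp [List.drop_left']⟩
  · rintro ⟨⟨t, ht⟩, hys⟩
    subst ht
    rw [List.drop_left] at hys
    obtain ⟨r, hr⟩ := hys
    exact ⟨r, by simp [hr]⟩

-- A's tail for a matched prefix equals B's handle of the corresponding path
theorem pv_tailA_eq (url p : String) :
    pvTailA url p = String.ofList (pvHandleB (url.toList.drop p.toList.length)) := by
  rw [pvTailA, PySem.Str.splitMax?, PySem.Str.stripChars, PySem.Str.slice, PySem.Str.len]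
  simp only [String.toList_ofList, PySem.Chars.slice]
  rw [PySem.List.slice_from _ (by positivity : (0:Int) ≤ (p.toList.length : Int))]
  rw [show ((p.toList.length : Int)).toNat = p.toList.length from rfl]
  rw [show "/".toList = ['/'] from rfl]
  rw [PySem.Chars.splitMax?, if_neg (by simp : ¬ (['/'] : List Char).isEmpty = true)]
  rw [Option.map_some, Option.getD_some]
  rw [show ("" : String) = String.ofList [] from rfl]
  rw [PySem.List.pyGetD_map String.ofList _ 0 []]
  rw [pv_head_split]

-- two incomparable lists cannot both be prefixes of the same list
theorem pv_excl {a b l : List Char} (h1 : a <+: l) (h2 : b <+: l)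
    (hab : ¬ a <+: b) (hba : ¬ b <+: a) : False :=
  (List.prefix_or_prefix_of_prefix h1 h2).elim hab hba

theorem pv_ofList_ne_empty_iff (h : List Char) : (String.ofList h ≠ "") ↔ h ≠ [] := by
  constructor
  · intro hne he; exact hne (he ▸ rfl)
  · intro hne he; exact hne (by simpa using congrArg String.toList he)

-- ===== VERDICT (by name: the statement is the Claim_ definition above) =====
theorem handle_from_twitter_url_py_spec : Claim_equal_handle_from_twitter_url_py := by
  intro url _
  unfold Spec_handle_from_twitter_url_py handle_from_twitter_url_py handle_from_twitter_url_py_alt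
  by_cases hu : url = ""
  · subst hu; rfl
  rw [if_neg hu]
  set l := url.toList with hl
  have swT : ∀ p : String, (p.toList <+: l) → PySem.Str.startswith url p = true := by
    intro p h
    rw [PySem.Str.startswith]
    exact (PySem.Chars.startswith_iff _ _).mpr h
  have swF : ∀ p : String, ¬ (p.toList <+: l) → PySem.Str.startswith url p = false := by
    intro p h
    rw [PySem.Str.startswith]
    exact Bool.eq_false_iff.mpr (fun hb => h ((PySem.Chars.startswith_iff _ _).mp hb))
  have cwT : ∀ (m p : List Char), (p <+: m) → PySem.Chars.startswith m p = true := by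
    intro m p h; exact (PySem.Chars.startswith_iff _ _).mpr h
  have cwF : ∀ (m p : List Char), ¬ (p <+: m) → PySem.Chars.startswith m p = false := by
    intro m p h; exact Bool.eq_false_iff.mpr (fun hb => h ((PySem.Chars.startswith_iff _ _).mp hb))
  -- decompositions of the four accepted prefixes
  have e1 : ("https://twitter.com/".toList <+: l) ↔
      ("https://".toList <+: l ∧ "twitter.com/".toList <+: l.drop 8) := by
    have h := pv_prefix_append_iff "https://".toList "twitter.com/".toList l
    rwa [show "https://".toList ++ "twitter.com/".toList = "https://twitter.com/".toList from rfl,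
      show ("https://".toList).length = 8 from rfl] at h
  have e3 : ("https://x.com/".toList <+: l) ↔
      ("https://".toList <+: l ∧ "x.com/".toList <+: l.drop 8) := by
    have h := pv_prefix_append_iff "https://".toList "x.com/".toList l
    rwa [show "https://".toList ++ "x.com/".toList = "https://x.com/".toList from rfl,
      show ("https://".toList).length = 8 from rfl] at h
  have e2 : ("https://www.twitter.com/".toList <+: l) ↔
      ("https://".toList <+: l ∧ "www.".toList <+: l.drop 8 ∧
        "twitter.com/".toList <+: (l.drop 8).drop 4) := by
    have h := pv_prefix_append_iff "https://".toList "www.twitter.com/".toList l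
    rw [show "https://".toList ++ "www.twitter.com/".toList = "https://www.twitter.com/".toList from rfl,
      show ("https://".toList).length = 8 from rfl] at h
    have h2 := pv_prefix_append_iff "www.".toList "twitter.com/".toList (l.drop 8)
    rw [show "www.".toList ++ "twitter.com/".toList = "www.twitter.com/".toList from rfl,
      show ("www.".toList).length = 4 from rfl] at h2
    rw [h, h2]
  have e4 : ("https://www.x.com/".toList <+: l) ↔
      ("https://".toList <+: l ∧ "www.".toList <+: l.drop 8 ∧
        "x.com/".toList <+: (l.drop 8).drop 4) := by
    have h := pv_prefix_append_iff "https://".toList "www.x.com/".toList l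
    rw [show "https://".toList ++ "www.x.com/".toList = "https://www.x.com/".toList from rfl,
      show ("https://".toList).length = 8 from rfl] at h
    have h2 := pv_prefix_append_iff "www.".toList "x.com/".toList (l.drop 8)
    rw [show "www.".toList ++ "x.com/".toList = "www.x.com/".toList from rfl,
      show ("www.".toList).length = 4 from rfl] at h2
    rw [h, h2]
  by_cases h8 : "https://".toList <+: l
  case neg =>
    -- no accepted prefix can match; B rejects at the scheme
    have f1 : ¬ ("https://twitter.com/".toList <+: l) := fun h => h8 (e1.mp h).1
    have f2 : ¬ ("https://www.twitter.com/".toList <+: l) := fun h => h8 (e2.mp h).1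
    have f3 : ¬ ("https://x.com/".toList <+: l) := fun h => h8 (e3.mp h).1
    have f4 : ¬ ("https://www.x.com/".toList <+: l) := fun h => h8 (e4.mp h).1
    simp only [pvLoopA]
    rw [swF _ f1, swF _ f2, swF _ f3, swF _ f4, swF _ h8]
    simp
  case pos =>
  by_cases hw : "www.".toList <+: l.drop 8
  case pos =>
    have f1 : ¬ ("https://twitter.com/".toList <+: l) := fun h =>
      pv_excl (e1.mp h).2 hw (by decide) (by decide)
    have f3 : ¬ ("https://x.com/".toList <+: l) := fun h =>
      pv_excl (e3.mp h).2 hw (by decide) (by decide)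
    by_cases htw : "twitter.com/".toList <+: (l.drop 8).drop 4
    case pos =>
      -- https://www.twitter.com/… : prefix 2 matches (length 24)
      have f4 : ¬ ("https://www.x.com/".toList <+: l) := fun h =>
        pv_excl (e4.mp h).2.2 htw (by decide) (by decide)
      simp only [pvLoopA, pvRestB, pvPathB]
      rw [swF _ f1, swT _ (e2.mpr ⟨h8, hw, htw⟩), swF _ f3, swF _ f4, swT _ h8, cwT _ _ hw]
      simp only [Bool.false_eq_true, eq_self_iff_true, if_true, if_false, not_true]
      rw [cwT _ _ htw]
      rw [pv_tailA_eq url "https://www.twitter.com/",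
        show ("https://www.twitter.com/".toList).length = 24 from rfl]
      rw [← hl]
      by_cases hh : pvHandleB (l.drop 24) = []
      · simp [hh, List.drop_drop, show String.ofList [] = "" from rfl]
      · simp [hh, (pv_ofList_ne_empty_iff _).mpr hh, List.drop_drop]
    case neg =>
      have f2 : ¬ ("https://www.twitter.com/".toList <+: l) := fun h => htw (e2.mp h).2.2
      by_cases hx : "x.com/".toList <+: (l.drop 8).drop 4
      case pos =>
        -- https://www.x.com/… : prefix 4 matches (length 18)
        simp only [pvLoopA, pvRestB, pvPathB]
        rw [swF _ f1, swF _ f2, swF _ f3, swT _ (e4.mpr ⟨h8, hw, hx⟩), swT _ h8, cwT _ _ hw]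
        simp only [Bool.false_eq_true, eq_self_iff_true, if_true, if_false, not_true]
        rw [cwF _ _ htw]
        simp only [Bool.false_eq_true, if_false]
        rw [cwT _ _ hx]
        rw [pv_tailA_eq url "https://www.x.com/",
          show ("https://www.x.com/".toList).length = 18 from rfl]
        rw [← hl]
        by_cases hh : pvHandleB (l.drop 18) = []
        · simp [hh, List.drop_drop, show String.ofList [] = "" from rfl]
        · simp [hh, (pv_ofList_ne_empty_iff _).mpr hh, List.drop_drop]
      case neg =>
        have f4 : ¬ ("https://www.x.com/".toList <+: l) := fun h => hx (e4.mp h).2.2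
        simp only [pvLoopA, pvRestB, pvPathB]
        rw [swF _ f1, swF _ f2, swF _ f3, swF _ f4, swT _ h8, cwT _ _ hw]
        simp only [Bool.false_eq_true, eq_self_iff_true, if_true, if_false, not_true]
        rw [cwF _ _ htw]
        simp only [Bool.false_eq_true, if_false]
        rw [cwF _ _ hx]
        simp
  case neg =>
    have f2 : ¬ ("https://www.twitter.com/".toList <+: l) := fun h => hw (e2.mp h).2.1
    have f4 : ¬ ("https://www.x.com/".toList <+: l) := fun h => hw (e4.mp h).2.1
    by_cases htw : "twitter.com/".toList <+: l.drop 8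
    case pos =>
      -- https://twitter.com/… : prefix 1 matches (length 20)
      have f3 : ¬ ("https://x.com/".toList <+: l) := fun h =>
        pv_excl (e3.mp h).2 htw (by decide) (by decide)
      simp only [pvLoopA, pvRestB, pvPathB]
      rw [swT _ (e1.mpr ⟨h8, htw⟩), swF _ f2, swF _ f3, swF _ f4, swT _ h8, cwF _ _ hw]
      simp only [Bool.false_eq_true, eq_self_iff_true, if_true, if_false, not_true]
      rw [cwT _ _ htw]
      rw [pv_tailA_eq url "https://twitter.com/",
        show ("https://twitter.com/".toList).length = 20 from rfl]
      rw [← hl]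
      by_cases hh : pvHandleB (l.drop 20) = []
      · simp [hh, List.drop_drop, show String.ofList [] = "" from rfl]
      · simp [hh, (pv_ofList_ne_empty_iff _).mpr hh, List.drop_drop]
    case neg =>
      have f1 : ¬ ("https://twitter.com/".toList <+: l) := fun h => htw (e1.mp h).2
      by_cases hx : "x.com/".toList <+: l.drop 8
      case pos =>
        -- https://x.com/… : prefix 3 matches (length 14)
        simp only [pvLoopA, pvRestB, pvPathB]
        rw [swF _ f1, swF _ f2, swT _ (e3.mpr ⟨h8, hx⟩), swF _ f4, swT _ h8, cwF _ _ hw]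
        simp only [Bool.false_eq_true, eq_self_iff_true, if_true, if_false, not_true]
        rw [cwF _ _ htw]
        simp only [Bool.false_eq_true, if_false]
        rw [cwT _ _ hx]
        rw [pv_tailA_eq url "https://x.com/",
          show ("https://x.com/".toList).length = 14 from rfl]
        rw [← hl]
        by_cases hh : pvHandleB (l.drop 14) = []
        · simp [hh, List.drop_drop, show String.ofList [] = "" from rfl]
        · simp [hh, (pv_ofList_ne_empty_iff _).mpr hh, List.drop_drop]
      case neg =>
        have f3 : ¬ ("https://x.com/".toList <+: l) := fun h => hx (e3.mp h).2
        simp only [pvLoopA, pvRestB, pvPathB]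
        rw [swF _ f1, swF _ f2, swF _ f3, swF _ f4, swT _ h8, cwF _ _ hw]
        simp only [Bool.false_eq_true, eq_self_iff_true, if_true, if_false, not_true]
        rw [cwF _ _ htw]
        simp only [Bool.false_eq_true, if_false]
        rw [cwF _ _ hx]
        simp
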